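-- pv_equiv track=rewrite | github.com/AyaPK/advent-of-code | 2015/day11/part1.py | has_a_straight
-- ===== SOURCE A (Python) =====
-- from string import ascii_lowercase
--
-- def has_a_straight(word):
--     for i, letter in enumerate(ascii_lowercase):
--         three = ascii_lowercase[i:i + 3]
--         if three in word:
--             if len(three) == 3:
--                 return True
--             else:
--                 continue
--         else:
--             continue
--     return False
-- ===== SOURCE B (Python) =====
-- def has_a_straight(word):
--     # One linear pass over adjacent character triples instead of 24 substring searches.
--     for a, b, c in zip(word, word[1:], word[2:]):
--         x = ord(a)
--         if ord('a') <= x <= ord('x') and ord(b) == x + 1 and ord(c) == x + 2: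
--             return True
--     return False
-- ===== Notes on version B (the rewrite author's own statement) =====
-- stated objective: simpler
-- what changed: Replaced the 26-iteration loop that slices the alphabet and does a substring search per slice with a single linear scan over adjacent character triples comparing ord codes within a-z.
import Mathlib
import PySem

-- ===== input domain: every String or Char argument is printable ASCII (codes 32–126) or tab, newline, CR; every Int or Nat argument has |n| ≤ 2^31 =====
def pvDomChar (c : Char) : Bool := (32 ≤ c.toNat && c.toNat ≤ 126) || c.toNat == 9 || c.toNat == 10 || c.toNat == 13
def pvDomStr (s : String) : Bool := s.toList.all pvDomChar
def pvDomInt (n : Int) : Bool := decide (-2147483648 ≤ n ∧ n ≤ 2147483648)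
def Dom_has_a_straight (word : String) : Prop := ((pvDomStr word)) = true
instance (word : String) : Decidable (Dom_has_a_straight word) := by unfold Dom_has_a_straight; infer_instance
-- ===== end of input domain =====

-- B replaces A's 26 alphabet-slice substring searches with one linear pass over adjacent
-- character triples comparing ord codes within a–z (objective: simpler).

-- ===== PORT A =====
def alphabet : List Char := "abcdefghijklmnopqrstuvwxyz".toList

def aLoop (word : List Char) : List (Int × Char) → Bool
  | [] => false
  | (i, _) :: rest =>
    let three := PySem.List.slice alphabet (some i) (some (i + 3))
    if PySem.Chars.isIn three word then
      if three.length == 3 then true else aLoop word rest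
    else aLoop word rest

def has_a_straight (word : String) : Bool :=
  aLoop word.toList (PySem.List.enumerate alphabet 0)

-- ===== PORT B =====
def bLoop : List Char → Bool
  | a :: b :: c :: rest =>
    if 'a'.toNat ≤ a.toNat && a.toNat ≤ 'x'.toNat
        && b.toNat == a.toNat + 1 && c.toNat == a.toNat + 2 then true
    else bLoop (b :: c :: rest)
  | _ => false

def has_a_straight_alt (word : String) : Bool := bLoop word.toList

-- ===== PRECONDITION & SPEC =====
def Spec_has_a_straight (word : String) (out : Bool) : Prop := out = has_a_straight_alt word
instance (word : String) (out : Bool) : Decidable (Spec_has_a_straight word out) := by unfold Spec_has_a_straight; infer_instance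

-- ===== CLAIM (what is proved, stated in full; the proofs are below) =====
def Claim_equal_has_a_straight : Prop := ∀ (word : String), Dom_has_a_straight word → Spec_has_a_straight word (has_a_straight word)

-- ===== LEMMAS AND PROOFS =====

-- the 24 length-3 slices of the alphabet, in A's order
def straights : List (List Char) :=
  [['a','b','c'], ['b','c','d'], ['c','d','e'], ['d','e','f'], ['e','f','g'], ['f','g','h'],
   ['g','h','i'], ['h','i','j'], ['i','j','k'], ['j','k','l'], ['k','l','m'], ['l','m','n'],
   ['m','n','o'], ['n','o','p'], ['o','p','q'], ['p','q','r'], ['q','r','s'], ['r','s','t'],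
   ['s','t','u'], ['t','u','v'], ['u','v','w'], ['v','w','x'], ['w','x','y'], ['x','y','z']]

-- triple (a,b,c) is a straight wholly inside a..z (B's loop condition as a Prop)
def straight (a b c : Char) : Prop :=
  'a'.toNat ≤ a.toNat ∧ a.toNat ≤ 'x'.toNat ∧ b.toNat = a.toNat + 1 ∧ c.toNat = a.toNat + 2

-- A's loop over the alphabet literal reduces to the 24 substring tests
lemma A_iff (word : String) :
    has_a_straight word = true ↔ ∃ l ∈ straights, l <:+: word.toList := by
  have : has_a_straight word =
      (straights.map (fun l => PySem.Chars.isIn l word.toList)).any id := by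
    simp [has_a_straight, alphabet, aLoop, PySem.List.enumerate, PySem.List.slice,
          PySem.List.clampIdx, straights]
  rw [this]
  simp [straights, PySem.Chars.isIn_iff_infix]

-- every member of straights is a straight triple
lemma straight_of_mem {l : List Char} (h : l ∈ straights) :
    ∃ a b c, l = [a, b, c] ∧ straight a b c := by
  fin_cases h <;> exact ⟨_, _, _, rfl, by unfold straight; refine ⟨by decide, by decide, by decide, by decide⟩⟩

-- every straight triple is a member of straights
lemma mem_of_straight {a b c : Char} (h : straight a b c) : [a, b, c] ∈ straights := by
  obtain ⟨h1, h2, h3, h4⟩ := h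
  have ha : Char.ofNat a.toNat = a := Char.ofNat_toNat a
  have hb : Char.ofNat (a.toNat + 1) = b := by rw [← h3]; exact Char.ofNat_toNat b
  have hc : Char.ofNat (a.toNat + 2) = c := by rw [← h4]; exact Char.ofNat_toNat c
  rw [← ha, ← hb, ← hc]
  have hl : 97 ≤ a.toNat := h1
  have hr : a.toNat ≤ 120 := h2
  interval_cases (a.toNat) <;> decide

-- B's loop finds exactly an adjacent straight triple
lemma B_iff (cs : List Char) :
    bLoop cs = true ↔ ∃ a b c, [a, b, c] <:+: cs ∧ straight a b c := by
  induction cs with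
  | nil =>
    simp only [bLoop, Bool.false_eq_true, false_iff]
    rintro ⟨a, b, c, h, _⟩
    have := h.length_le
    simp at this
  | cons x t ih =>
    match t, ih with
    | [], _ =>
      simp only [bLoop, Bool.false_eq_true, false_iff]
      rintro ⟨a, b, c, h, _⟩
      have := h.length_le
      simp at this
    | [y], _ =>
      simp only [bLoop, Bool.false_eq_true, false_iff]
      rintro ⟨a, b, c, h, _⟩
      have := h.length_le
      simp at this
    | y :: z :: r, ih =>
      rw [show bLoop (x :: y :: z :: r) =
          (if 'a'.toNat ≤ x.toNat && x.toNat ≤ 'x'.toNat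
              && y.toNat == x.toNat + 1 && z.toNat == x.toNat + 2 then true
           else bLoop (y :: z :: r)) from rfl]
      split_ifs with hcond
      · simp only [true_iff]
        simp only [Bool.and_eq_true, decide_eq_true_eq, beq_iff_eq] at hcond
        exact ⟨x, y, z, ⟨[], r, rfl⟩, hcond.1.1.1, hcond.1.1.2, hcond.1.2, hcond.2⟩
      · rw [ih]
        constructor
        · rintro ⟨a, b, c, h, hs⟩
          exact ⟨a, b, c, h.trans (List.infix_cons (List.infix_refl _)), hs⟩
        · rintro ⟨a, b, c, h, hs⟩
          rcases List.infix_cons_iff.mp h with hp | hi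
          · obtain ⟨u, hu⟩ := hp
            have hx : a = x ∧ b = y ∧ c = z := by
              injection hu with e1 hu; injection hu with e2 hu; injection hu with e3 _
              exact ⟨e1, e2, e3⟩
            obtain ⟨ea, eb, ec⟩ := hx
            subst ea eb ec
            exfalso
            apply hcond
            simp only [Bool.and_eq_true, decide_eq_true_eq, beq_iff_eq]
            exact ⟨⟨⟨hs.1, hs.2.1⟩, hs.2.2.1⟩, hs.2.2.2⟩
          · exact ⟨a, b, c, hi, hs⟩

-- ===== VERDICT (by name: the statement is the Claim_ definition above) =====
theorem has_a_straight_spec : Claim_equal_has_a_straight := by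
  intro word _
  unfold Spec_has_a_straight has_a_straight_alt
  rw [Bool.eq_iff_iff, A_iff, B_iff]
  constructor
  · rintro ⟨l, hl, hinf⟩
    obtain ⟨a, b, c, rfl, hs⟩ := straight_of_mem hl
    exact ⟨a, b, c, hinf, hs⟩
  · rintro ⟨a, b, c, hinf, hs⟩
    exact ⟨[a, b, c], mem_of_straight hs, hinf⟩
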